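-- pv_equiv track=rewrite | github.com/souravs17031999/100dayscodingchallenge | matrix specific/maximum_sum_submatrix_sorted_matrix.py | compute_suffix
-- ===== SOURCE A (Python) =====
-- def compute_suffix(mat):
--     n = len(mat)
--     # first we go for column wise addition
--     for i in range(n - 1, -1, -1):
--         for j in range(n - 2, -1, -1):
--             mat[i][j] += mat[i][j + 1]
--
--     # now we go for row wise addition
--     for i in range(n - 2, -1, -1):
--         for j in range(n - 1, -1, -1):
--             mat[i][j] += mat[i + 1][j]
--
--     return mat
-- ===== SOURCE B (Python) =====
-- def compute_suffix(mat):
--     n = len(mat)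
--     # single reverse pass using inclusion-exclusion on the already-final neighbours
--     for i in range(n - 1, -1, -1):
--         row = mat[i]
--         below = mat[i + 1] if i + 1 < n else None
--         for j in range(n - 1, -1, -1):
--             down = below[j] if below is not None else 0
--             right = row[j + 1] if j + 1 < n else 0
--             diag = below[j + 1] if below is not None and j + 1 < n else 0
--             row[j] += down + right - diag
--     return mat
-- ===== Notes on version B (the rewrite author's own statement) =====
-- stated objective: alternative
-- what changed: B replaces A's two separate directional sweeps (row-suffix pass then column-accumulation pass) by a single reverse double loop using the inclusion-exclusion recurrence mat[i][j] += down + right - diag on already-finalised neighbours.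
-- outside the precondition, e.g. on compute_suffix([[]]): A returns [[]], B raises IndexError
import Mathlib
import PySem

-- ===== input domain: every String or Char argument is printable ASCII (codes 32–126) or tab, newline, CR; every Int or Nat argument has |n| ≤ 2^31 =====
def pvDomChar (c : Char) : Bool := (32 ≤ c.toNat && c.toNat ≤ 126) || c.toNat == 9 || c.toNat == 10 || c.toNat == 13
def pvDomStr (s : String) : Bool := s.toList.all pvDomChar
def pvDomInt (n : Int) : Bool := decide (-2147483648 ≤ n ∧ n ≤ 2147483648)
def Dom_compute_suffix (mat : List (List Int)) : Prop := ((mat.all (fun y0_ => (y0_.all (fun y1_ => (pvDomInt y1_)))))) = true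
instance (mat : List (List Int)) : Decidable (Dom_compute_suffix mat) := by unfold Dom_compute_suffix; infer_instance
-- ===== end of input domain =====

-- B replaces A's two directional sweeps by one reverse inclusion-exclusion pass; return value AND the
-- in-place mutation are the same (both mutate their argument in Python); equivalence proved on the return value.

-- ===== PORT A =====
-- inner loop of A's first pass: for j in range(cnt-1, -1, -1): row[j] += row[j+1]   (cnt = n-1)
def csColLoop (row : List Int) : Nat → List Int
  | 0 => row
  | j + 1 => csColLoop (row.set j (row.getD j 0 + row.getD (j+1) 0)) j

-- first pass: for i in range(cnt-1, -1, -1): row i := csColLoop (row i) (n-1)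
def csPass1 (n : Nat) (mat : List (List Int)) : Nat → List (List Int)
  | 0 => mat
  | i + 1 => csPass1 n (mat.set i (csColLoop (mat.getD i []) (n - 1))) i

-- inner loop of A's second pass: for j in range(cnt-1, -1, -1): r[j] += s[j]
def csRowAdd (r s : List Int) : Nat → List Int
  | 0 => r
  | j + 1 => csRowAdd (r.set j (r.getD j 0 + s.getD j 0)) s j

-- second pass: for i in range(cnt-1, -1, -1): row i := csRowAdd (row i) (row (i+1)) n   (cnt = n-1)
def csPass2 (n : Nat) (mat : List (List Int)) : Nat → List (List Int)
  | 0 => mat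
  | i + 1 => csPass2 n (mat.set i (csRowAdd (mat.getD i []) (mat.getD (i+1) []) n)) i

def compute_suffix (mat : List (List Int)) : List (List Int) :=
  let n := mat.length
  csPass2 n (csPass1 n mat n) (n - 1)

-- ===== PORT B =====
-- inner loop of B: for j in range(cnt-1, -1, -1): row[j] += down + right - diag
-- below = some (row i+1) when i+1 < n, none otherwise (B's `below is not None` test)
def csBInner (n : Nat) (row : List Int) (below : Option (List Int)) : Nat → List Int
  | 0 => row
  | j + 1 =>
    let down : Int := match below with | some s => s.getD j 0 | none => 0
    let right : Int := if j + 1 < n then row.getD (j+1) 0 else 0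
    let diag : Int := match below with
      | some s => if j + 1 < n then s.getD (j+1) 0 else 0
      | none => 0
    csBInner n (row.set j (row.getD j 0 + (down + right - diag))) below j

-- outer loop of B: for i in range(cnt-1, -1, -1)
def csBOuter (n : Nat) (mat : List (List Int)) : Nat → List (List Int)
  | 0 => mat
  | i + 1 =>
    let below : Option (List Int) := if i + 1 < n then some (mat.getD (i+1) []) else none
    csBOuter n (mat.set i (csBInner n (mat.getD i []) below n)) i

def compute_suffix_alt (mat : List (List Int)) : List (List Int) :=
  let n := mat.length
  csBOuter n mat n

-- ===== PRECONDITION & SPEC =====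
-- Pre_ excludes ragged matrices with a row shorter than len(mat): there A either raises IndexError
-- (n ≥ 2) or, when n = 1, trivially returns while B's single-pass recurrence itself raises IndexError.
def Pre_compute_suffix (mat : List (List Int)) : Prop :=
  ∀ r ∈ mat, mat.length ≤ r.length
instance (mat : List (List Int)) : Decidable (Pre_compute_suffix mat) := by
  unfold Pre_compute_suffix; infer_instance

def pvWitness_compute_suffix : List (List Int) := [[1, 2], [3, 4]]

def Spec_compute_suffix (mat : List (List Int)) (out : List (List Int)) : Prop := out = compute_suffix_alt mat
instance (mat : List (List Int)) (out : List (List Int)) : Decidable (Spec_compute_suffix mat out) := by unfold Spec_compute_suffix; infer_instance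

-- ===== CLAIM (what is proved, stated in full; the proofs are below) =====
def Claim_equal_compute_suffix : Prop := ∀ (mat : List (List Int)), Dom_compute_suffix mat → Pre_compute_suffix mat → Spec_compute_suffix mat (compute_suffix mat)

-- ===== LEMMAS AND PROOFS =====

-- Σ_{k=j}^{j+m-1} f k, recursing from the top
def csAcc (f : Nat → Int) : Nat → Nat → Int
  | _, 0 => 0
  | j, m + 1 => f j + csAcc f (j+1) m

theorem csAcc_snoc (f : Nat → Int) (j m : Nat) :
    csAcc f j (m+1) = csAcc f j m + f (j + m) := by
  induction m generalizing j with
  | zero => simp [csAcc]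
  | succ m ih =>
    rw [show csAcc f j (m+1+1) = f j + csAcc f (j+1) (m+1) from rfl, ih (j+1),
        show csAcc f j (m+1) = f j + csAcc f (j+1) m from rfl,
        show j+1+m = j+(m+1) by omega]
    ring

theorem csAcc_congr {f g : Nat → Int} (j m : Nat)
    (h : ∀ k, j ≤ k → k < j + m → f k = g k) : csAcc f j m = csAcc g j m := by
  induction m generalizing j with
  | zero => rfl
  | succ m ih =>
    simp only [csAcc]
    rw [h j (le_refl j) (by omega), ih (j+1) (fun k hk hk2 => h k (by omega) (by omega))]

theorem csGetD_set (l : List Int) (i k : Nat) (v : Int) :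
    (l.set i v).getD k 0 = if i = k ∧ k < l.length then v else l.getD k 0 := by
  simp only [List.getD_eq_getElem?_getD, List.getElem?_set]
  split_ifs with h1 <;> simp_all

theorem csGetD_rowset (l : List (List Int)) (i k : Nat) (v : List Int) :
    (l.set i v).getD k [] = if i = k ∧ k < l.length then v else l.getD k [] := by
  simp only [List.getD_eq_getElem?_getD, List.getElem?_set]
  split_ifs with h1 <;> simp_all

theorem csColLoop_length (row : List Int) (c : Nat) : (csColLoop row c).length = row.length := by
  induction c generalizing row with
  | zero => rfl
  | succ c ih => simp [csColLoop, ih]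

theorem csColLoop_getD (c : Nat) (row : List Int) (hc : c < row.length) (j : Nat) :
    (csColLoop row c).getD j 0 =
      if j < c then csAcc (fun k => row.getD k 0) j (c + 1 - j) else row.getD j 0 := by
  induction c generalizing row with
  | zero => simp [csColLoop]
  | succ c ih =>
    set r' := row.set c (row.getD c 0 + row.getD (c+1) 0) with hr'
    have hne : ∀ k, c ≠ k → r'.getD k 0 = row.getD k 0 := by
      intro k h; rw [hr', csGetD_set, if_neg (by tauto)]
    have heq : r'.getD c 0 = row.getD c 0 + row.getD (c+1) 0 := by
      rw [hr', csGetD_set, if_pos ⟨rfl, by omega⟩]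
    rw [show csColLoop row (c+1) = csColLoop r' c from rfl,
        ih r' (by simp [hr']; omega)]
    rcases lt_trichotomy j c with hj | hj | hj
    · rw [if_pos hj, if_pos (by omega : j < c + 1)]
      have e1 : csAcc (fun k => r'.getD k 0) j (c - j) =
          csAcc (fun k => row.getD k 0) j (c - j) :=
        csAcc_congr _ _ (fun k hk hk2 => hne k (by omega))
      have e2 : c + 1 - j = (c - j) + 1 := by omega
      have e3 : c + 1 + 1 - j = ((c - j) + 1) + 1 := by omega
      rw [e2, e3, csAcc_snoc, csAcc_snoc, csAcc_snoc, e1,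
          show j + (c - j) = c by omega, show j + (c - j + 1) = c + 1 by omega, heq]
      ring
    · subst hj
      rw [if_neg (by omega : ¬ j < j), if_pos (by omega : j < j + 1), heq,
          show j + 1 + 1 - j = 2 by omega]
      simp [csAcc]
    · rw [if_neg (by omega : ¬ j < c), if_neg (by omega : ¬ j < c + 1), hne j (by omega)]

theorem csRowAdd_length (r s : List Int) (c : Nat) : (csRowAdd r s c).length = r.length := by
  induction c generalizing r with
  | zero => rfl
  | succ c ih => simp [csRowAdd, ih]

theorem csRowAdd_getD (c : Nat) (r s : List Int) (hc : c ≤ r.length) (j : Nat) :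
    (csRowAdd r s c).getD j 0 =
      if j < c then r.getD j 0 + s.getD j 0 else r.getD j 0 := by
  induction c generalizing r with
  | zero => simp [csRowAdd]
  | succ c ih =>
    set r' := r.set c (r.getD c 0 + s.getD c 0) with hr'
    have hne : ∀ k, c ≠ k → r'.getD k 0 = r.getD k 0 := by
      intro k h; rw [hr', csGetD_set, if_neg (by tauto)]
    have heq : r'.getD c 0 = r.getD c 0 + s.getD c 0 := by
      rw [hr', csGetD_set, if_pos ⟨rfl, by omega⟩]
    rw [show csRowAdd r s (c+1) = csRowAdd r' s c from rfl, ih r' (by simp [hr']; omega)]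
    rcases lt_trichotomy j c with hj | hj | hj
    · rw [if_pos hj, if_pos (by omega : j < c + 1), hne j (by omega)]
    · subst hj
      rw [if_neg (by omega : ¬ j < j), if_pos (by omega : j < j + 1), heq]
    · rw [if_neg (by omega : ¬ j < c), if_neg (by omega : ¬ j < c + 1), hne j (by omega)]

def csDv (d : Option (List Int)) (j : Nat) : Int :=
  match d with | some s => s.getD j 0 | none => 0

theorem csBInner_length (n : Nat) (r : List Int) (d : Option (List Int)) (c : Nat) :
    (csBInner n r d c).length = r.length := by
  induction c generalizing r with
  | zero => rfl
  | succ c ih => simp [csBInner, ih]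

theorem csBInner_getD (n : Nat) (c : Nat) (r : List Int) (d : Option (List Int))
    (hc : c ≤ n) (hn : n ≤ r.length) (j : Nat) :
    (csBInner n r d c).getD j 0 =
      if j < c then
        csAcc (fun k => r.getD k 0) j (c - j) + csDv d j +
          (if c < n then r.getD c 0 - csDv d c else 0)
      else r.getD j 0 := by
  induction c generalizing r with
  | zero => simp [csBInner]
  | succ c ih =>
    have hcr : c < r.length := by omega
    set w : Int := r.getD c 0 + (csDv d c + (if c + 1 < n then r.getD (c+1) 0 else 0) -
        (if c + 1 < n then csDv d (c+1) else 0)) with hw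
    set r' := r.set c w with hr'
    have hne : ∀ k, c ≠ k → r'.getD k 0 = r.getD k 0 := by
      intro k h; rw [hr', csGetD_set, if_neg (by tauto)]
    have heq : r'.getD c 0 = w := by
      rw [hr', csGetD_set, if_pos ⟨rfl, hcr⟩]
    have hstep : csBInner n r d (c+1) = csBInner n r' d c := by
      rw [hr', hw]
      cases d <;> simp [csBInner, csDv]
    rw [hstep, ih r' (by omega) (by simp [hr']; omega)]
    rcases lt_trichotomy j c with hj | hj | hj
    · rw [if_pos hj, if_pos (by omega : j < c + 1), if_pos (by omega : c < n)]
      have e1 : csAcc (fun k => r'.getD k 0) j (c - j) =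
          csAcc (fun k => r.getD k 0) j (c - j) :=
        csAcc_congr _ _ (fun k hk hk2 => hne k (by omega))
      rw [e1, heq, hw,
          show c + 1 - j = (c - j) + 1 by omega, csAcc_snoc,
          show j + (c - j) = c by omega]
      split_ifs with h <;> ring
    · subst hj
      rw [if_neg (by omega : ¬ j < j), if_pos (by omega : j < j + 1),
          heq, hw, show j + 1 - j = 1 by omega]
      simp only [csAcc, add_zero]
      split_ifs with h <;> ring
    · rw [if_neg (by omega : ¬ j < c), if_neg (by omega : ¬ j < c + 1), hne j (by omega)]

theorem csList_eq_of_getD (a b : List Int) (h : a.length = b.length)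
    (h2 : ∀ j, j < a.length → a.getD j 0 = b.getD j 0) : a = b := by
  apply List.ext_getElem h
  intro j h1 h2'
  have := h2 j h1
  rwa [List.getD_eq_getElem _ _ h1, List.getD_eq_getElem _ _ h2'] at this

-- row-level: B's combined row update with a row below = A's colLoop-then-rowAdd
theorem csRowSome (n : Nat) (r s : List Int) (hn1 : 1 ≤ n) (hn : n ≤ r.length) :
    csBInner n r (some s) n = csRowAdd (csColLoop r (n-1)) s n := by
  apply csList_eq_of_getD
  · rw [csBInner_length, csRowAdd_length, csColLoop_length]
  · intro j hj
    rw [csBInner_length] at hj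
    rw [csBInner_getD n n r (some s) (le_refl n) hn j,
        csRowAdd_getD n _ s (by rw [csColLoop_length]; exact hn) j,
        csColLoop_getD (n-1) r (by omega) j]
    by_cases h1 : j < n
    · simp only [if_pos h1]
      by_cases h2 : j < n - 1
      · simp only [if_pos h2, csDv]
        have : n - 1 + 1 - j = n - j := by omega
        rw [this]; simp
      · have hj1 : j = n - 1 := by omega
        simp only [if_neg h2, csDv]
        have : n - j = 1 := by omega
        rw [this]; simp [csAcc]
    · have h2 : ¬ j < n - 1 := by omega
      simp [h1, h2]

-- row-level: B's row update with no row below = A's colLoop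
theorem csRowNone (n : Nat) (r : List Int) (hn1 : 1 ≤ n) (hn : n ≤ r.length) :
    csBInner n r none n = csColLoop r (n-1) := by
  apply csList_eq_of_getD
  · rw [csBInner_length, csColLoop_length]
  · intro j hj
    rw [csBInner_length] at hj
    rw [csBInner_getD n n r none (le_refl n) hn j, csColLoop_getD (n-1) r (by omega) j]
    by_cases h1 : j < n
    · simp only [if_pos h1]
      by_cases h2 : j < n - 1
      · simp only [if_pos h2, csDv]
        have : n - 1 + 1 - j = n - j := by omega
        rw [this]; simp
      · have hj1 : j = n - 1 := by omega
        simp only [if_neg h2, csDv]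
        have : n - j = 1 := by omega
        rw [this]; simp [csAcc]
    · have h2 : ¬ j < n - 1 := by omega
      simp [h1, h2]

theorem csPass1_spec (n : Nat) (c : Nat) (m : List (List Int)) (hc : c ≤ m.length) :
    (csPass1 n m c).length = m.length ∧
    (∀ i, (csPass1 n m c).getD i [] =
      if i < c then csColLoop (m.getD i []) (n-1) else m.getD i []) := by
  induction c generalizing m with
  | zero => simp [csPass1]
  | succ c ih =>
    set m' := m.set c (csColLoop (m.getD c []) (n-1)) with hm'
    have hne : ∀ k, c ≠ k → m'.getD k [] = m.getD k [] := by
      intro k h; rw [hm', csGetD_rowset, if_neg (by tauto)]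
    have heq : m'.getD c [] = csColLoop (m.getD c []) (n-1) := by
      rw [hm', csGetD_rowset, if_pos ⟨rfl, by omega⟩]
    obtain ⟨ihl, ihv⟩ := ih m' (by simp [hm']; omega)
    have hstep : csPass1 n m (c+1) = csPass1 n m' c := rfl
    constructor
    · rw [hstep, ihl]; simp [hm']
    · intro i
      rw [hstep, ihv i]
      rcases lt_trichotomy i c with hi | hi | hi
      · rw [if_pos hi, if_pos (by omega : i < c + 1), hne i (by omega)]
      · subst hi
        rw [if_neg (by omega : ¬ i < i), if_pos (by omega : i < i + 1), heq]
      · rw [if_neg (by omega : ¬ i < c), if_neg (by omega : ¬ i < c + 1), hne i (by omega)]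

theorem csPass2_spec (n : Nat) (c : Nat) (m : List (List Int)) (hc : c ≤ m.length) :
    (csPass2 n m c).length = m.length ∧
    (∀ i, c ≤ i → (csPass2 n m c).getD i [] = m.getD i []) ∧
    (∀ i, i < c → (csPass2 n m c).getD i [] =
      csRowAdd (m.getD i []) ((csPass2 n m c).getD (i+1) []) n) := by
  induction c generalizing m with
  | zero => simp [csPass2]
  | succ c ih =>
    set m' := m.set c (csRowAdd (m.getD c []) (m.getD (c+1) []) n) with hm'
    have hne : ∀ k, c ≠ k → m'.getD k [] = m.getD k [] := by
      intro k h; rw [hm', csGetD_rowset, if_neg (by tauto)]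
    have heq : m'.getD c [] = csRowAdd (m.getD c []) (m.getD (c+1) []) n := by
      rw [hm', csGetD_rowset, if_pos ⟨rfl, by omega⟩]
    obtain ⟨ihl, ihhi, ihlo⟩ := ih m' (by simp [hm']; omega)
    have hstep : csPass2 n m (c+1) = csPass2 n m' c := rfl
    refine ⟨by rw [hstep, ihl]; simp [hm'], ?_, ?_⟩
    · intro i hi
      rw [hstep, ihhi i (by omega), hne i (by omega)]
    · intro i hi
      rw [hstep]
      rcases lt_trichotomy i c with h | h | h
      · rw [ihlo i h, hne i (by omega)]
      · subst h
        rw [ihhi i (le_refl i), heq]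
        congr 1
        rw [ihhi (i+1) (by omega), hne (i+1) (by omega)]
      · omega

theorem csBOuter_spec (n : Nat) (c : Nat) (m : List (List Int)) (hc : c ≤ m.length) :
    (csBOuter n m c).length = m.length ∧
    (∀ i, c ≤ i → (csBOuter n m c).getD i [] = m.getD i []) ∧
    (∀ i, i < c → (csBOuter n m c).getD i [] =
      csBInner n (m.getD i [])
        (if i + 1 < n then some ((csBOuter n m c).getD (i+1) []) else none) n) := by
  induction c generalizing m with
  | zero => simp [csBOuter]
  | succ c ih =>
    set d : Option (List Int) := (if c + 1 < n then some (m.getD (c+1) []) else none) with hd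
    set m' := m.set c (csBInner n (m.getD c []) d n) with hm'
    have hne : ∀ k, c ≠ k → m'.getD k [] = m.getD k [] := by
      intro k h; rw [hm', csGetD_rowset, if_neg (by tauto)]
    have heq : m'.getD c [] = csBInner n (m.getD c []) d n := by
      rw [hm', csGetD_rowset, if_pos ⟨rfl, by omega⟩]
    obtain ⟨ihl, ihhi, ihlo⟩ := ih m' (by simp [hm']; omega)
    have hstep : csBOuter n m (c+1) = csBOuter n m' c := by
      rw [hm', hd]; simp only [csBOuter]
    refine ⟨by rw [hstep, ihl]; simp [hm'], ?_, ?_⟩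
    · intro i hi
      rw [hstep, ihhi i (by omega), hne i (by omega)]
    · intro i hi
      rw [hstep]
      rcases lt_trichotomy i c with h | h | h
      · rw [ihlo i h, hne i (by omega)]
      · subst h
        rw [ihhi i (le_refl i), heq]
        by_cases hn' : i + 1 < n
        · rw [hd, if_pos hn', if_pos hn']
          congr 2
          rw [ihhi (i+1) (by omega), hne (i+1) (by omega)]
        · rw [hd, if_neg hn', if_neg hn']
      · omega

theorem compute_suffix_rows (mat : List (List Int)) (hpre : Pre_compute_suffix mat) :
    ∀ k i, i < mat.length → mat.length ≤ i + k →
      (compute_suffix mat).getD i [] = (compute_suffix_alt mat).getD i [] := by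
  set n := mat.length with hn
  have hrowlen : ∀ i, i < n → n ≤ (mat.getD i []).length := by
    intro i hi
    have : mat.getD i [] ∈ mat := by
      rw [List.getD_eq_getElem _ _ hi]
      exact List.getElem_mem _
    exact hpre _ this
  obtain ⟨h1l, h1v⟩ := csPass1_spec n n mat (le_refl _)
  obtain ⟨h2l, h2hi, h2lo⟩ := csPass2_spec n (n-1) (csPass1 n mat n) (by omega)
  obtain ⟨hbl, hbhi, hblo⟩ := csBOuter_spec n n mat (le_refl _)
  have hA : compute_suffix mat = csPass2 n (csPass1 n mat n) (n-1) := rfl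
  have hB : compute_suffix_alt mat = csBOuter n mat n := rfl
  intro k
  induction k with
  | zero => intro i hi habs; omega
  | succ k ihk =>
    intro i hi hik
    by_cases htop : i + 1 = n
    · -- bottom row: A leaves the pass1 row; B's inner loop with no row below
      rw [hA, hB, h2hi i (by omega), h1v i, if_pos hi, hblo i hi]
      simp only [htop, lt_irrefl, if_false]
      exact (csRowNone n _ (by omega) (hrowlen i hi)).symm
    · have hi1 : i + 1 < n := by omega
      rw [hA, hB, h2lo i (by omega), h1v i, if_pos hi, hblo i hi]
      simp only [if_pos hi1]
      rw [← hA, ← hB, ← ihk (i+1) hi1 (by omega)]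
      exact (csRowSome n _ _ (by omega) (hrowlen i hi)).symm

-- ===== VERDICT (by name: the statement is the Claim_ definition above) =====
theorem compute_suffix_spec : Claim_equal_compute_suffix := by
  intro mat _ hpre
  unfold Spec_compute_suffix
  set n := mat.length with hn
  obtain ⟨h1l, _⟩ := csPass1_spec n n mat (le_refl _)
  obtain ⟨h2l, _, _⟩ := csPass2_spec n (n-1) (csPass1 n mat n) (by omega)
  obtain ⟨hbl, _, _⟩ := csBOuter_spec n n mat (le_refl _)
  have hA : compute_suffix mat = csPass2 n (csPass1 n mat n) (n-1) := rfl
  have hB : compute_suffix_alt mat = csBOuter n mat n := rfl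
  have hlenA : (compute_suffix mat).length = n := by rw [hA, h2l, h1l]
  have hlenB : (compute_suffix_alt mat).length = n := by rw [hB, hbl]
  apply List.ext_getElem (by rw [hlenA, hlenB])
  intro i hi1 hi2
  have hiN : i < n := by rwa [hlenA] at hi1
  have := compute_suffix_rows mat hpre n i hiN (by omega)
  rwa [List.getD_eq_getElem _ _ hi1, List.getD_eq_getElem _ _ hi2] at this
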